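-- pv_equiv track=rewrite | github.com/psa-jbeaumont/gherkin-starterkit-robotframework | lib/ReporterLibrary.py | extract_suite_and_test
-- ===== SOURCE A (Python) =====
-- def extract_suite_and_test(longname: str, sep: str = '.') -> tuple[str, str]:
--     """
--     Retourne (suite_name, test_name) où test_name est le dernier segment,
--     et suite_name est l'avant-dernier (dernier parent). Si longname n'a qu'un
--     segment, suite_name est "".
--     - Ignore les segments vides (ex: 'A..B' -> ['A','B'])
--     - Tolère les espaces accidentels autour du séparateur.
--     """
--     if longname is None:
--         return "", ""
--
--     # Nettoyage léger
--     s = longname.strip()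
--
--     # Découper et filtrer les segments vides
--     parts = [p.strip() for p in s.split(sep) if p.strip() != ""]
--
--     if not parts:
--         return "", ""
--
--     if len(parts) == 1:
--         return "", parts[0]
--
--     # Dernier parent + feuille
--     return parts[-2], parts[-1]
-- ===== SOURCE B (Python) =====
-- def extract_suite_and_test(longname: str, sep: str = '.') -> tuple[str, str]:
--     if longname is None:
--         return "", ""
--     s = longname.strip()
--     suite = None
--     test = None
--     for p in reversed(s.split(sep)):
--         q = p.strip()
--         if q == "":
--             continue
--         if test is None:
--             test = q
--         else:
--             suite = q
--             break
--     return (suite if suite is not None else "",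
--             test if test is not None else "")
-- ===== Notes on version B (the rewrite author's own statement) =====
-- stated objective: alternative
-- what changed: Instead of building the full filtered list of stripped segments and indexing [-2]/[-1], B scans the raw segments right-to-left with two Option accumulators and stops as soon as the last two non-empty segments are found; Pre_ excludes only an empty separator with a present longname, where both A and B raise ValueError from str.split.
import Mathlib
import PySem

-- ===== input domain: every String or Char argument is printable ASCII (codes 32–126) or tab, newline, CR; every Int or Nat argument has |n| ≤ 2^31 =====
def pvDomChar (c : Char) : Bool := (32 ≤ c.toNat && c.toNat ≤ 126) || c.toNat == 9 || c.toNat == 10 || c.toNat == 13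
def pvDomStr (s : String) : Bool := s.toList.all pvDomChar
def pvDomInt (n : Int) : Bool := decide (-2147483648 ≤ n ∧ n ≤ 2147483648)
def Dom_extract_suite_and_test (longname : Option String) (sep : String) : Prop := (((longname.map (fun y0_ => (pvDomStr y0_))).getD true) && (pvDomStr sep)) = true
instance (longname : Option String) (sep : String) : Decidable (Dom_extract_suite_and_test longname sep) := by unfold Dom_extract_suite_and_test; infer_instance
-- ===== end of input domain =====

-- B replaces the build-filtered-list-then-index-[-2]/[-1] pass by a right-to-left scan
-- with two Option accumulators that stops once the last two non-empty segments are found (alternative decomposition).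

-- ===== PORT A =====
def extract_suite_and_test (longname : Option String) (sep : String) : String × String :=
  match longname with
  | none => ("", "")
  | some ln =>
    let s := PySem.Str.strip ln
    -- s.split(sep): split? is none only for an empty separator, which Pre_ excludes (Python raises ValueError there)
    let parts := (((PySem.Str.split? s sep).getD []).map PySem.Str.strip).filter (fun p => p ≠ "")
    if parts = [] then ("", "")
    else if parts.length = 1 then ("", (PySem.List.pyGet? parts 0).getD "")
    else ((PySem.List.pyGet? parts (-2)).getD "", (PySem.List.pyGet? parts (-1)).getD "")

-- ===== PORT B =====
-- the reversed for-loop of Source B: two Option accumulators, break once both are set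
def pvAltLoop : List String → Option String → Option String → Option String × Option String
  | [], suite, test => (suite, test)
  | p :: rest, suite, test =>
    let q := PySem.Str.strip p
    if q = "" then pvAltLoop rest suite test
    else
      match test with
      | none => pvAltLoop rest suite (some q)
      | some _ => (some q, test)

def extract_suite_and_test_alt (longname : Option String) (sep : String) : String × String :=
  match longname with
  | none => ("", "")
  | some ln =>
    let s := PySem.Str.strip ln
    let st := pvAltLoop (((PySem.Str.split? s sep).getD []).reverse) none none
    (st.1.getD "", st.2.getD "")

-- ===== PRECONDITION & SPEC =====
-- Pre_ excludes an empty separator with a present longname: str.split raises ValueError there in both A and B.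
def Pre_extract_suite_and_test (longname : Option String) (sep : String) : Prop :=
  longname = none ∨ sep ≠ ""
instance (longname : Option String) (sep : String) : Decidable (Pre_extract_suite_and_test longname sep) := by unfold Pre_extract_suite_and_test; infer_instance
def pvWitness_extract_suite_and_test : Option String × String := (some "Suite.Sub.Test", ".")

def Spec_extract_suite_and_test (longname : Option String) (sep : String) (out : String × String) : Prop := out = extract_suite_and_test_alt longname sep
instance (longname : Option String) (sep : String) (out : String × String) : Decidable (Spec_extract_suite_and_test longname sep out) := by unfold Spec_extract_suite_and_test; infer_instance

-- ===== CLAIM (what is proved, stated in full; the proofs are below) =====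
def Claim_equal_extract_suite_and_test : Prop := ∀ (longname : Option String) (sep : String), Dom_extract_suite_and_test longname sep → Pre_extract_suite_and_test longname sep → Spec_extract_suite_and_test longname sep (extract_suite_and_test longname sep)

-- ===== LEMMAS AND PROOFS =====

-- classification of the loop once `test` is already set
theorem pvAltLoop_some (t : String) : ∀ (l : List String) (su : Option String),
    pvAltLoop l su (some t) =
      (match (l.map PySem.Str.strip).filter (fun p => p ≠ "") with
       | [] => (su, some t)
       | s :: _ => (some s, some t)) := by
  intro l
  induction l with
  | nil => intro su; simp [pvAltLoop]
  | cons p rest ih =>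
    intro su
    by_cases h : PySem.Str.strip p = "" <;>
      simp [pvAltLoop, h, ih]

-- classification of the loop from the initial state
theorem pvAltLoop_none : ∀ (l : List String),
    pvAltLoop l none none =
      (match (l.map PySem.Str.strip).filter (fun p => p ≠ "") with
       | [] => (none, none)
       | [t] => (none, some t)
       | t :: s :: _ => (some s, some t)) := by
  intro l
  induction l with
  | nil => simp [pvAltLoop]
  | cons p rest ih =>
    by_cases h : PySem.Str.strip p = ""
    · simpa [pvAltLoop, h] using ih
    · simp only [pvAltLoop, h, if_neg, List.map_cons, List.filter_cons,
        ne_eq, not_false_eq_true, decide_true, if_true]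
      rw [pvAltLoop_some]
      rcases hF : (rest.map PySem.Str.strip).filter (fun p => p ≠ "") with - | ⟨s, rest'⟩ <;>
        simp

theorem extract_suite_and_test_spec : Claim_equal_extract_suite_and_test := by
  intro longname sep _ _
  unfold Spec_extract_suite_and_test extract_suite_and_test extract_suite_and_test_alt
  cases longname with
  | none => rfl
  | some ln =>
    simp only
    set l := ((PySem.Str.split? (PySem.Str.strip ln) sep).getD []) with hl
    rw [pvAltLoop_none]
    have hrev : ((l.reverse.map PySem.Str.strip).filter (fun p => p ≠ "")) =
        ((l.map PySem.Str.strip).filter (fun p => p ≠ "")).reverse := by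
      simp [List.map_reverse, List.filter_reverse]
    rw [hrev]
    set F := (l.map PySem.Str.strip).filter (fun p => p ≠ "") with hF
    rcases hR : F.reverse with - | ⟨t, R⟩
    · have : F = [] := by
        have := congrArg List.reverse hR; simpa using this
      simp [this]
    · rcases R with - | ⟨s, R'⟩
      · have hFe : F = [t] := by
          have := congrArg List.reverse hR; simpa using this
        simp [hFe]
      · have hFe : F = R'.reverse ++ [s, t] := by
          have := congrArg List.reverse hR; simpa using this
        have hlen : F.length = R'.length + 2 := by simp [hFe]
        have hne : F ≠ [] := by simp [hFe]
        have hne1 : F.length ≠ 1 := by omega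
        rw [if_neg hne, if_neg hne1]
        have hm2 : PySem.List.pyGet? F (-2) = some s := by
          rw [PySem.List.pyGet?_neg_ofNat F 2 (by omega) (by omega)]
          rw [hFe]
          have : (R'.reverse ++ [s, t]).length - 2 = R'.reverse.length := by
            simp
          rw [this, List.getElem?_append_right (le_refl _)]
          simp
        have hm1 : PySem.List.pyGet? F (-1) = some t := by
          rw [PySem.List.pyGet?_neg_one, hFe]
          simp
        simp [hm2, hm1]
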